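-- pv_equiv track=rewrite | github.com/perkPerkins/480Calculator | Calculator.py | detect_multiple_operators
-- ===== SOURCE A (Python) =====
-- def detect_multiple_operators(expression):
--     token_list = list(expression)
--     op_count = 0
--     for token in token_list:
--         if token in "/+-*":
--             op_count += 1
--         else:
--             op_count = 0
--         if op_count == 2:
--             return True
--     return False
-- ===== SOURCE B (Python) =====
-- def detect_multiple_operators(expression):
--     return any(a in "/+-*" and b in "/+-*"
--                for a, b in zip(expression, expression[1:]))
-- ===== Notes on version B (the rewrite author's own statement) =====
-- stated objective: simpler
-- what changed: Replaces the stateful reset-counter loop with a stateless adjacency check: any() over zipped consecutive character pairs, each pair tested for both characters being operators.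
import Mathlib
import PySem

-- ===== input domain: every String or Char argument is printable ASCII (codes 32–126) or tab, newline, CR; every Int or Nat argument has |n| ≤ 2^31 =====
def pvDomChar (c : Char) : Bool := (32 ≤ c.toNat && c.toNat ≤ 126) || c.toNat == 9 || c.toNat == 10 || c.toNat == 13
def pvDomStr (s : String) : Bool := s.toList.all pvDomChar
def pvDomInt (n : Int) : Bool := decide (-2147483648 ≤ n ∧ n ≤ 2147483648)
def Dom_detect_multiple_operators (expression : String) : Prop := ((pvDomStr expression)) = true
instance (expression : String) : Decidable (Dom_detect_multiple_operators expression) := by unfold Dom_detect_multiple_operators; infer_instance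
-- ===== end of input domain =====

-- B replaces A's reset-counter loop with a stateless any() over zipped consecutive pairs (objective: simpler).

-- ===== PORT A =====
-- `token in "/+-*"` of A
def pvIsOp (c : Char) : Bool := "/+-*".toList.contains c

-- A's for-loop with early return: state is op_count
def pvLoopA : List Char → Nat → Bool
  | [], _ => false
  | c :: cs, opCount =>
    let opCount' := if pvIsOp c then opCount + 1 else 0
    if opCount' = 2 then true else pvLoopA cs opCount'

def detect_multiple_operators (expression : String) : Bool :=
  pvLoopA expression.toList 0

-- ===== PORT B =====
-- any(a in "/+-*" and b in "/+-*" for a, b in zip(expression, expression[1:]))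
def detect_multiple_operators_alt (expression : String) : Bool :=
  (expression.toList.zip expression.toList.tail).any (fun p => pvIsOp p.1 && pvIsOp p.2)

-- ===== PRECONDITION & SPEC =====
def Spec_detect_multiple_operators (expression : String) (out : Bool) : Prop := out = detect_multiple_operators_alt expression
instance (expression : String) (out : Bool) : Decidable (Spec_detect_multiple_operators expression out) := by unfold Spec_detect_multiple_operators; infer_instance

-- ===== CLAIM (what is proved, stated in full; the proofs are below) =====
def Claim_equal_detect_multiple_operators : Prop := ∀ (expression : String), Dom_detect_multiple_operators expression → Spec_detect_multiple_operators expression (detect_multiple_operators expression)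

-- ===== LEMMAS AND PROOFS =====

def pvPairs (cs : List Char) : Bool :=
  (cs.zip cs.tail).any (fun p => pvIsOp p.1 && pvIsOp p.2)

theorem pvLoop_key (cs : List Char) :
    pvLoopA cs 0 = pvPairs cs ∧ ∀ c, pvIsOp c = true → pvLoopA cs 1 = pvPairs (c :: cs) := by
  induction cs with
  | nil => exact ⟨rfl, fun c _ => rfl⟩
  | cons d rest ih =>
    constructor
    · show (if (if pvIsOp d then 1 else 0) = 2 then true else pvLoopA rest (if pvIsOp d then 1 else 0)) = _
      by_cases hd : pvIsOp d = true
      · simp [hd, ih.2 d hd]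
      · simp only [Bool.not_eq_true] at hd
        cases rest with
        | nil => simp [hd, pvLoopA, pvPairs]
        | cons e r => simp [hd, ih.1, pvPairs]
    · intro c hc
      show (if (if pvIsOp d then 2 else 0) = 2 then true else pvLoopA rest (if pvIsOp d then 2 else 0)) = _
      by_cases hd : pvIsOp d = true
      · simp [hd, pvPairs, hc]
      · simp only [Bool.not_eq_true] at hd
        cases rest with
        | nil => simp [hd, pvLoopA, pvPairs]
        | cons e r =>
          have h0 := ih.1
          simp [hd, pvPairs] at h0 ⊢
          exact h0

-- ===== VERDICT (by name: the statement is the Claim_ definition above) =====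
theorem detect_multiple_operators_spec : Claim_equal_detect_multiple_operators := by
  intro e _
  unfold Spec_detect_multiple_operators detect_multiple_operators detect_multiple_operators_alt
  exact (pvLoop_key e.toList).1
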